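-- pv_equiv track=rewrite | github.com/benquick123/code-profiling | code/batch-1/vse-naloge-brez-testov/DN7-M-158.py | brez_sosedov
-- ===== SOURCE A (Python) =====
-- def sosedov(x, y, mine):
--
--     i=0
--     for yTMP in range(y-1,y+2):
--         for xTMP in range(x-1,x+2):
--             if (xTMP,yTMP) in mine-{(x,y)}:
--                 i=i+1
--     return i
--
-- def brez_sosedov(mine, s, v):
--
--     mnoBrez=set()
--     for y in range(0,v):
--         for x in range(0,s):
--            i=sosedov(x,y,mine)
--            if i == 0:
--                mnoBrez.add((x,y))
--     return mnoBrez
-- ===== SOURCE B (Python) =====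
-- def brez_sosedov(mine, s, v):
--     # Invert the scan: start with the whole grid and discard every cell that
--     # has an occupied 8-neighbor (a mine never marks its own cell because the
--     # (0,0) offset is skipped; off-grid marks are harmless discards).
--     cells = {(x, y) for y in range(v) for x in range(s)}
--     for (mx, my) in mine:
--         for dy in (-1, 0, 1):
--             for dx in (-1, 0, 1):
--                 if dx or dy:
--                     cells.discard((mx + dx, my + dy))
--     return cells
-- ===== Notes on version B (the rewrite author's own statement) =====
-- stated objective: faster
-- what changed: Instead of scanning the 3x3 neighborhood of every grid cell against the mine set, B starts from the full grid set and, for each mine, discards its 8 neighboring cells; what remains is the answer.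
import Mathlib
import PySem

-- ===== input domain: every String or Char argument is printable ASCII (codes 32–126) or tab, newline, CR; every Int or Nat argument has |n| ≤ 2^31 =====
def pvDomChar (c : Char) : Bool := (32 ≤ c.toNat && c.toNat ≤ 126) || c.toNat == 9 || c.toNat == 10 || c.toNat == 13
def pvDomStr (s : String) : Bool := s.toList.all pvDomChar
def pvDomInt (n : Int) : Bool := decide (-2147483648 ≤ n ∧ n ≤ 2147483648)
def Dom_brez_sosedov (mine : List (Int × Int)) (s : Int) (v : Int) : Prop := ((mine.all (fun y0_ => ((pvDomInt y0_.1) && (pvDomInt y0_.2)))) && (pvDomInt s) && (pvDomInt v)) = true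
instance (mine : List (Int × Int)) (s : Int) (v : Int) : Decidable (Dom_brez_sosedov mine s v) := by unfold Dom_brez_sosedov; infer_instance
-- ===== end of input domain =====

-- B replaces A's per-cell 3x3 neighborhood scan by one pass over the mines that
-- discards each mine's 8 neighbors from the full grid set.

-- ===== PORT A =====
def sosedov (x y : Int) (mine : List (Int × Int)) : Int :=
  (PySem.List.pyRange (y - 1) (y + 2) 1).foldl (fun i yTMP =>
    (PySem.List.pyRange (x - 1) (x + 2) 1).foldl (fun i xTMP =>
      if PySem.Set.contains (PySem.Set.diff mine [(x, y)]) (xTMP, yTMP) then i + 1 else i) i) 0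

def brez_sosedov (mine : List (Int × Int)) (s : Int) (v : Int) : List (Int × Int) :=
  (PySem.List.pyRange 0 v 1).foldl (fun mnoBrez y =>
    (PySem.List.pyRange 0 s 1).foldl (fun mnoBrez x =>
      if sosedov x y mine = 0 then PySem.Set.add mnoBrez (x, y) else mnoBrez) mnoBrez)
    PySem.Set.empty

-- ===== PORT B =====
def brez_sosedov_alt (mine : List (Int × Int)) (s : Int) (v : Int) : List (Int × Int) :=
  mine.foldl (fun cells m =>
    ([(-1 : Int), 0, 1]).foldl (fun cells dy =>
      ([(-1 : Int), 0, 1]).foldl (fun cells dx =>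
        if dx ≠ 0 ∨ dy ≠ 0 then PySem.Set.discard cells (m.1 + dx, m.2 + dy) else cells)
        cells) cells)
    (PySem.Set.ofList ((PySem.List.pyRange 0 v 1).flatMap (fun y =>
      (PySem.List.pyRange 0 s 1).map (fun x => (x, y)))))

-- ===== PRECONDITION & SPEC =====
def Spec_brez_sosedov (mine : List (Int × Int)) (s : Int) (v : Int) (out : List (Int × Int)) : Prop := out = brez_sosedov_alt mine s v
instance (mine : List (Int × Int)) (s : Int) (v : Int) (out : List (Int × Int)) : Decidable (Spec_brez_sosedov mine s v out) := by unfold Spec_brez_sosedov; infer_instance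

-- ===== CLAIM (what is proved, stated in full; the proofs are below) =====
def Claim_equal_brez_sosedov : Prop := ∀ (mine : List (Int × Int)) (s : Int) (v : Int), Dom_brez_sosedov mine s v → Spec_brez_sosedov mine s v (brez_sosedov mine s v)

-- ===== LEMMAS AND PROOFS =====

-- the grid in row-major order
def pvGrid (s v : Int) : List (Int × Int) :=
  (PySem.List.pyRange 0 v 1).flatMap (fun y => (PySem.List.pyRange 0 s 1).map (fun x => (x, y)))

-- "cell c has no mine among its 8 neighbors"
def pvFree (mine : List (Int × Int)) (c : Int × Int) : Bool :=
  !((c.1 - 1, c.2 - 1) ∈ mine ∨ (c.1, c.2 - 1) ∈ mine ∨ (c.1 + 1, c.2 - 1) ∈ mine ∨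
    (c.1 - 1, c.2) ∈ mine ∨ (c.1 + 1, c.2) ∈ mine ∨
    (c.1 - 1, c.2 + 1) ∈ mine ∨ (c.1, c.2 + 1) ∈ mine ∨ (c.1 + 1, c.2 + 1) ∈ mine : Prop)

theorem pvGrid_nodup (s v : Int) : (pvGrid s v).Nodup := by
  unfold pvGrid
  refine List.nodup_flatMap.2 ⟨?_, ?_⟩
  · intro y _
    exact (PySem.List.nodup_pyRange_one 0 s).map (fun a b h => congrArg Prod.fst h)
  · refine List.Pairwise.imp ?_ (PySem.List.nodup_pyRange_one 0 v)
    rintro y1 y2 h c hc1 hc2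
    simp only [List.mem_map] at hc1 hc2
    obtain ⟨x1, -, rfl⟩ := hc1
    obtain ⟨x2, -, h2⟩ := hc2
    exact h (congrArg Prod.snd h2).symm

theorem foldl_count (P : Int → Bool) : ∀ (l : List Int) (n : Int),
    l.foldl (fun i c => if P c then i + 1 else i) n = n + (l.countP P : Int) := by
  intro l
  induction l with
  | nil => intro n; simp
  | cons c t ih =>
    intro n
    simp only [List.foldl_cons, List.countP_cons, ih]
    by_cases h : P c <;> simp [h] <;> omega

theorem foldl_add_sum (g : Int → Int) : ∀ (l : List Int) (n : Int),
    l.foldl (fun i c => i + g c) n = n + (l.map g).sum := by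
  intro l
  induction l with
  | nil => intro n; simp
  | cons c t ih => intro n; simp only [List.foldl_cons, List.map_cons, List.sum_cons, ih]; ring

theorem nested_count (P : Int → Int → Bool) (xs ys : List Int) (n : Int) :
    ys.foldl (fun i yT => xs.foldl (fun i xT => if P xT yT then i + 1 else i) i) n
      = n + ((ys.map (fun yT => (xs.countP (fun xT => P xT yT) : Int))).sum) := by
  have e : (fun (i : Int) (yT : Int) =>
      xs.foldl (fun i xT => if P xT yT then i + 1 else i) i)
      = fun i yT => i + (xs.countP (fun xT => P xT yT) : Int) := by
    funext i yT
    exact foldl_count (fun xT => P xT yT) xs i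
  rw [e, foldl_add_sum]

theorem sosedov_eq_zero_iff (x y : Int) (mine : List (Int × Int)) :
    sosedov x y mine = 0 ↔ pvFree mine (x, y) = true := by
  have hys : PySem.List.pyRange (y - 1) (y + 2) 1 = [y - 1, y, y + 1] := by
    rw [PySem.List.pyRange_one_cons (by omega), PySem.List.pyRange_one_cons (by omega),
        PySem.List.pyRange_one_cons (by omega), PySem.List.pyRange_one_eq_nil (by omega)]
    norm_num
  have hxs : PySem.List.pyRange (x - 1) (x + 2) 1 = [x - 1, x, x + 1] := by
    rw [PySem.List.pyRange_one_cons (by omega), PySem.List.pyRange_one_cons (by omega),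
        PySem.List.pyRange_one_cons (by omega), PySem.List.pyRange_one_eq_nil (by omega)]
    norm_num
  unfold sosedov
  rw [hys, hxs,
      nested_count (fun xT yT => PySem.Set.contains (PySem.Set.diff mine [(x, y)]) (xT, yT))
        [x - 1, x, x + 1] [y - 1, y, y + 1] 0]
  have hc : ∀ a b : Int,
      (PySem.Set.contains (PySem.Set.diff mine [(x, y)]) (a, b) = true) ↔
        ((a, b) ∈ mine ∧ ¬(a = x ∧ b = y)) := by
    intro a b
    rw [PySem.Set.contains_iff, PySem.Set.mem_diff]
    simp [Prod.ext_iff]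
  have hz : ∀ a b c : Nat,
      ((0 : Int) + ((a : Int) + ((b : Int) + ((c : Int) + 0))) = 0) ↔
        (a = 0 ∧ b = 0 ∧ c = 0) := by
    intro a b c; omega
  simp only [List.map_cons, List.map_nil, List.sum_cons, List.sum_nil]
  rw [hz]
  simp only [List.countP_eq_zero, List.mem_cons, List.not_mem_nil, or_false]
  constructor
  · intro ⟨hr1, hr2, hr3⟩
    have h1 := hr1 (x - 1) (Or.inl rfl)
    have h2 := hr1 x (Or.inr (Or.inl rfl))
    have h3 := hr1 (x + 1) (Or.inr (Or.inr rfl))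
    have h4 := hr2 (x - 1) (Or.inl rfl)
    have h6 := hr2 (x + 1) (Or.inr (Or.inr rfl))
    have h7 := hr3 (x - 1) (Or.inl rfl)
    have h8 := hr3 x (Or.inr (Or.inl rfl))
    have h9 := hr3 (x + 1) (Or.inr (Or.inr rfl))
    simp only [pvFree, Bool.not_eq_true', decide_eq_false_iff_not]
    rintro (hm | hm | hm | hm | hm | hm | hm | hm)
    · exact h1 (by simpa using (hc _ _).mpr ⟨hm, fun he => absurd he.1 (by omega)⟩)
    · exact h2 (by simpa using (hc _ _).mpr ⟨hm, fun he => absurd he.2 (by omega)⟩)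
    · exact h3 (by simpa using (hc _ _).mpr ⟨hm, fun he => absurd he.1 (by omega)⟩)
    · exact h4 (by simpa using (hc _ _).mpr ⟨hm, fun he => absurd he.1 (by omega)⟩)
    · exact h6 (by simpa using (hc _ _).mpr ⟨hm, fun he => absurd he.1 (by omega)⟩)
    · exact h7 (by simpa using (hc _ _).mpr ⟨hm, fun he => absurd he.1 (by omega)⟩)
    · exact h8 (by simpa using (hc _ _).mpr ⟨hm, fun he => absurd he.2 (by omega)⟩)
    · exact h9 (by simpa using (hc _ _).mpr ⟨hm, fun he => absurd he.1 (by omega)⟩)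
  · intro hfree
    simp only [pvFree, Bool.not_eq_true', decide_eq_false_iff_not] at hfree
    push_neg at hfree
    obtain ⟨n1, n2, n3, n4, n5, n6, n7, n8⟩ := hfree
    refine ⟨?_, ?_, ?_⟩
    · rintro a (rfl | rfl | rfl) hct
      · exact n1 ((hc _ _).mp (by simpa using hct)).1
      · exact n2 ((hc _ _).mp (by simpa using hct)).1
      · exact n3 ((hc _ _).mp (by simpa using hct)).1
    · rintro a (rfl | rfl | rfl) hct
      · exact n4 ((hc _ _).mp (by simpa using hct)).1
      · exact ((hc _ _).mp (by simpa using hct)).2 ⟨rfl, rfl⟩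
      · exact n5 ((hc _ _).mp (by simpa using hct)).1
    · rintro a (rfl | rfl | rfl) hct
      · exact n6 ((hc _ _).mp (by simpa using hct)).1
      · exact n7 ((hc _ _).mp (by simpa using hct)).1
      · exact n8 ((hc _ _).mp (by simpa using hct)).1

-- A's nested add-fold over a nodup source list is a filter
theorem foldl_add_filter (P : Int × Int → Bool) :
    ∀ (l acc : List (Int × Int)), (acc ++ l).Nodup →
      l.foldl (fun a c => if P c then PySem.Set.add a c else a) acc = acc ++ l.filter P := by
  intro l
  induction l with
  | nil => intro acc _; simp
  | cons c t ih =>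
    intro acc hnd
    have hcn : c ∉ acc := by
      intro h
      exact (List.disjoint_of_nodup_append hnd) h (List.mem_cons_self ..)
    have hnd' : ((acc ++ [c]) ++ t).Nodup := by
      have e : acc ++ c :: t = (acc ++ [c]) ++ t := by simp
      rwa [e] at hnd
    simp only [List.foldl_cons, List.filter_cons]
    by_cases hP : P c
    · rw [if_pos hP, if_pos hP, PySem.Set.add_of_not_mem hcn, ih _ hnd']
      simp
    · rw [if_neg (by simp [hP]), if_neg (by simp [hP]), ih _ (List.Nodup.sublist (by simp) hnd)]

theorem portA_eq_filter (mine : List (Int × Int)) (s v : Int) :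
    brez_sosedov mine s v = (pvGrid s v).filter (pvFree mine) := by
  unfold brez_sosedov
  have step :
      (PySem.List.pyRange 0 v 1).foldl (fun mnoBrez y =>
        (PySem.List.pyRange 0 s 1).foldl (fun mnoBrez x =>
          if sosedov x y mine = 0 then PySem.Set.add mnoBrez (x, y) else mnoBrez) mnoBrez)
        PySem.Set.empty
      = (PySem.List.pyRange 0 v 1).foldl (fun acc2 y =>
          ((PySem.List.pyRange 0 s 1).map (fun x => (x, y))).foldl
            (fun a c => if pvFree mine c then PySem.Set.add a c else a) acc2)
        PySem.Set.empty := by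
    apply PySem.List.foldl_congr_mem
    intro a y _
    rw [List.foldl_map]
    apply PySem.List.foldl_congr_mem
    intro a2 x _
    by_cases h : sosedov x y mine = 0
    · rw [if_pos h, if_pos ((sosedov_eq_zero_iff x y mine).mp h)]
    · rw [if_neg h, if_neg (fun hc => h ((sosedov_eq_zero_iff x y mine).mpr hc))]
  rw [step]
  have flat : ∀ (L : List Int) (acc : List (Int × Int)),
      L.foldl (fun acc2 y =>
        ((PySem.List.pyRange 0 s 1).map (fun x => (x, y))).foldl
          (fun a c => if pvFree mine c then PySem.Set.add a c else a) acc2) acc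
      = (L.flatMap (fun y => (PySem.List.pyRange 0 s 1).map (fun x => (x, y)))).foldl
          (fun a c => if pvFree mine c then PySem.Set.add a c else a) acc := by
    intro L
    induction L with
    | nil => intro acc; rfl
    | cons h t ih => intro acc; simp only [List.foldl_cons, List.flatMap_cons,
        List.foldl_append, ih]
  rw [flat]
  exact foldl_add_filter (pvFree mine) (pvGrid s v) [] (by simpa using pvGrid_nodup s v)

-- one mine's 8 discards, as a filter
def pvAway (m c : Int × Int) : Bool :=
  !(c = (m.1 - 1, m.2 - 1) ∨ c = (m.1, m.2 - 1) ∨ c = (m.1 + 1, m.2 - 1) ∨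
    c = (m.1 - 1, m.2) ∨ c = (m.1 + 1, m.2) ∨
    c = (m.1 - 1, m.2 + 1) ∨ c = (m.1, m.2 + 1) ∨ c = (m.1 + 1, m.2 + 1) : Prop)

theorem discards_one (m : Int × Int) (L : List (Int × Int)) :
    ([(-1 : Int), 0, 1]).foldl (fun cells dy =>
      ([(-1 : Int), 0, 1]).foldl (fun cells dx =>
        if dx ≠ 0 ∨ dy ≠ 0 then PySem.Set.discard cells (m.1 + dx, m.2 + dy) else cells)
        cells) L
    = L.filter (pvAway m) := by
  simp only [List.foldl_cons, List.foldl_nil]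
  norm_num
  simp only [PySem.Set.discard, List.filter_filter]
  apply List.filter_congr
  intro c _
  rw [Bool.eq_iff_iff]
  simp only [pvAway, Bool.and_eq_true, Bool.not_eq_true', beq_eq_false_iff_ne, ne_eq,
    decide_eq_false_iff_not, sub_eq_add_neg]
  tauto

-- folding any step that filters is a filter by the conjunction
theorem foldl_filter_steps (step : List (Int × Int) → (Int × Int) → List (Int × Int))
    (p : (Int × Int) → (Int × Int) → Bool)
    (hstep : ∀ L m, step L m = L.filter (p m)) :
    ∀ (ms : List (Int × Int)) (base : List (Int × Int)),
      ms.foldl step base = base.filter (fun c => ms.all (fun m => p m c)) := by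
  intro ms
  induction ms with
  | nil =>
    intro base
    simp
  | cons m t ih =>
    intro base
    simp only [List.foldl_cons, hstep, ih, List.filter_filter]
    apply List.filter_congr
    intro c _
    simp [List.all_cons, Bool.and_comm]

theorem pvFree_eq_all (mine : List (Int × Int)) (c : Int × Int) :
    pvFree mine c = mine.all (fun m => pvAway m c) := by
  obtain ⟨c1, c2⟩ := c
  rw [Bool.eq_iff_iff]
  simp only [pvFree, pvAway, List.all_eq_true, Bool.not_eq_true', decide_eq_false_iff_not]
  constructor
  · intro g
    push_neg at g
    obtain ⟨g1, g2, g3, g4, g5, g6, g7, g8⟩ := g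
    rintro ⟨m1, m2⟩ hm (he | he | he | he | he | he | he | he) <;>
        simp only [Prod.mk.injEq] at he
    · exact g8 (by rw [show ((c1 + 1 : Int), (c2 + 1 : Int)) = ((m1 : Int), (m2 : Int)) from
        by simp [Prod.mk.injEq]; try omega]; exact hm)
    · exact g7 (by rw [show ((c1 : Int), (c2 + 1 : Int)) = ((m1 : Int), (m2 : Int)) from
        by simp [Prod.mk.injEq]; try omega]; exact hm)
    · exact g6 (by rw [show ((c1 - 1 : Int), (c2 + 1 : Int)) = ((m1 : Int), (m2 : Int)) from
        by simp [Prod.mk.injEq]; try omega]; exact hm)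
    · exact g5 (by rw [show ((c1 + 1 : Int), (c2 : Int)) = ((m1 : Int), (m2 : Int)) from
        by simp [Prod.mk.injEq]; try omega]; exact hm)
    · exact g4 (by rw [show ((c1 - 1 : Int), (c2 : Int)) = ((m1 : Int), (m2 : Int)) from
        by simp [Prod.mk.injEq]; try omega]; exact hm)
    · exact g3 (by rw [show ((c1 + 1 : Int), (c2 - 1 : Int)) = ((m1 : Int), (m2 : Int)) from
        by simp [Prod.mk.injEq]; try omega]; exact hm)
    · exact g2 (by rw [show ((c1 : Int), (c2 - 1 : Int)) = ((m1 : Int), (m2 : Int)) from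
        by simp [Prod.mk.injEq]; try omega]; exact hm)
    · exact g1 (by rw [show ((c1 - 1 : Int), (c2 - 1 : Int)) = ((m1 : Int), (m2 : Int)) from
        by simp [Prod.mk.injEq]; try omega]; exact hm)
  · intro h
    rintro (hm | hm | hm | hm | hm | hm | hm | hm)
    · exact h _ hm (Or.inr (Or.inr (Or.inr (Or.inr (Or.inr (Or.inr (Or.inr
        (by simp [Prod.mk.injEq]; try omega))))))))
    · exact h _ hm (Or.inr (Or.inr (Or.inr (Or.inr (Or.inr (Or.inr (Or.inl
        (by simp [Prod.mk.injEq]; try omega))))))))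
    · exact h _ hm (Or.inr (Or.inr (Or.inr (Or.inr (Or.inr (Or.inl
        (by simp [Prod.mk.injEq]; try omega)))))))
    · exact h _ hm (Or.inr (Or.inr (Or.inr (Or.inr (Or.inl
        (by simp [Prod.mk.injEq]; try omega))))))
    · exact h _ hm (Or.inr (Or.inr (Or.inr (Or.inl (by simp [Prod.mk.injEq]; try omega)))))
    · exact h _ hm (Or.inr (Or.inr (Or.inl (by simp [Prod.mk.injEq]; try omega))))
    · exact h _ hm (Or.inr (Or.inl (by simp [Prod.mk.injEq]; try omega)))
    · exact h _ hm (Or.inl (by simp [Prod.mk.injEq]; try omega))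

theorem portB_eq_filter (mine : List (Int × Int)) (s v : Int) :
    brez_sosedov_alt mine s v = (pvGrid s v).filter (pvFree mine) := by
  unfold brez_sosedov_alt
  rw [show PySem.Set.ofList ((PySem.List.pyRange 0 v 1).flatMap (fun y =>
      (PySem.List.pyRange 0 s 1).map (fun x => (x, y)))) = pvGrid s v from
    PySem.Set.ofList_eq_self_of_nodup _ (pvGrid_nodup s v)]
  rw [foldl_filter_steps _ (fun m c => pvAway m c) (fun L m => discards_one m L) mine
    (pvGrid s v)]
  apply List.filter_congr
  intro c _
  exact (pvFree_eq_all mine c).symm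

-- ===== VERDICT (by name: the statement is the Claim_ definition above) =====
theorem brez_sosedov_spec : Claim_equal_brez_sosedov := by
  intro mine s v _
  unfold Spec_brez_sosedov
  rw [portA_eq_filter, portB_eq_filter]
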